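-- pv_equiv track=rewrite | github.com/mfocuz/coding-challs | AoC/2023/day7_camel_cards.py | calc_hand_score
-- ===== SOURCE A (Python) =====
-- from collections import defaultdict
--
-- def calc_hand_score(hand):
--     cards = defaultdict(int)
--
--     jokers = 0
--     hand_score = 1
--     for card in hand:
--         if card in cards:
--             hand_score += cards[card] * hand_score
--
--         cards[card] += 1
--
--     return hand_score
-- ===== SOURCE B (Python) =====
-- from collections import Counter
--
--
-- def calc_hand_score(hand):
--     score = 1
--     for count in Counter(hand).values():
--         f = 1
--         for i in range(2, count + 1):
--             f *= i
--         score *= f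
--     return score
-- ===== Notes on version B (the rewrite author's own statement) =====
-- stated objective: alternative
-- what changed: A's single interleaved loop that multiplies the running score by (1 + current count) on each repeated card is replaced by a two-phase computation: tally all cards into a Counter, then return the product of factorial(count) over the distinct cards.
import Mathlib
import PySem

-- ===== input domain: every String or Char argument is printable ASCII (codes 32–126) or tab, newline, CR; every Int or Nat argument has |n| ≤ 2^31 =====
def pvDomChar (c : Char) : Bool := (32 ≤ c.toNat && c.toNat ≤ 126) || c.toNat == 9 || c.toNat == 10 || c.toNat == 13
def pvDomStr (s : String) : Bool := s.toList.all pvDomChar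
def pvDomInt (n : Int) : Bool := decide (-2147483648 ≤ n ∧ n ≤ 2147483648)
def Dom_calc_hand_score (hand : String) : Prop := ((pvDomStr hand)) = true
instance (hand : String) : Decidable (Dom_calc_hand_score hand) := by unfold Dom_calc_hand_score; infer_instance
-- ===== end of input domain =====

-- B replaces A's single interleaved multiply-as-you-count loop by a two-phase Counter-then-product-of-factorials computation (objective: simpler/alternative, same value).

-- ===== PORT A =====
-- A's loop body: a defaultdict of counts plus the running score, updated per card.
def pvStepA (st : PySem.Dict Char Int × Int) (card : Char) : PySem.Dict Char Int × Int :=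
  let cards := st.1
  let hand_score := st.2
  let hand_score := if cards.contains card then hand_score + cards.getD card 0 * hand_score else hand_score
  (cards.modify card 0 (· + 1), hand_score)

def calc_hand_score (hand : String) : Int :=
  (hand.toList.foldl pvStepA (PySem.Dict.empty, 1)).2

-- ===== PORT B =====
-- Source B's inner loop: f = 1; for i in range(2, count+1): f *= i
def pvFact (count : Int) : Int :=
  (PySem.List.pyRange 2 (count + 1) 1).foldl (fun f i => f * i) 1

def calc_hand_score_alt (hand : String) : Int :=
  (PySem.Dict.counter hand.toList).values.foldl (fun score count => score * pvFact count) 1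

-- ===== PRECONDITION & SPEC =====
def Spec_calc_hand_score (hand : String) (out : Int) : Prop := out = calc_hand_score_alt hand
instance (hand : String) (out : Int) : Decidable (Spec_calc_hand_score hand out) := by unfold Spec_calc_hand_score; infer_instance

-- ===== CLAIM (what is proved, stated in full; the proofs are below) =====
def Claim_equal_calc_hand_score : Prop := ∀ (hand : String), Dom_calc_hand_score hand → Spec_calc_hand_score hand (calc_hand_score hand)

-- ===== LEMMAS AND PROOFS =====

-- the product A's score gathers while scanning l with the prefix p already counted
def pvProdStep : List Char → List Char → Int
  | _, [] => 1
  | p, c :: l => ((p.count c : Int) + 1) * pvProdStep (p ++ [c]) l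

-- B's value as a product over the distinct cards
def pvProd (q : List Char) : Int :=
  ((PySem.Set.ofList q).map (fun k => pvFact ((q.count k : Int)))).prod

lemma pvFact_succ (n : Nat) : pvFact ((n : Int) + 1) = pvFact (n : Int) * ((n : Int) + 1) := by
  cases n with
  | zero => decide
  | succ m =>
    have h2 : (2 : Int) ≤ ((m + 1 : Nat) : Int) + 1 := by push_cast; omega
    unfold pvFact
    rw [PySem.List.pyRange_one_succ_right h2, List.foldl_append]
    simp

lemma pvFoldMul (vs : List Int) (s : Int) :
    vs.foldl (fun score count => score * pvFact count) s = s * (vs.map pvFact).prod := by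
  induction vs generalizing s with
  | nil => simp
  | cons v vs ih => simp [ih, mul_assoc]

lemma pvB_eq (hand : String) : calc_hand_score_alt hand = pvProd hand.toList := by
  unfold calc_hand_score_alt pvProd
  rw [pvFoldMul]
  simp only [PySem.Dict.values, PySem.Dict.items_counter, List.map_map, one_mul]
  rfl

lemma pvA_loop (l p : List Char) (s : Int) :
    (l.foldl pvStepA (PySem.Dict.counter p, s)).2 = s * pvProdStep p l := by
  induction l generalizing p s with
  | nil => simp [pvProdStep]
  | cons c l ih =>
    have hd : (PySem.Dict.counter p).modify c 0 (· + 1) = PySem.Dict.counter (p ++ [c]) :=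
      (PySem.Dict.counter_append_singleton p c).symm
    simp only [List.foldl_cons, pvStepA, hd, ih, pvProdStep]
    by_cases hc : c ∈ p
    · simp only [PySem.Dict.contains_counter, PySem.Dict.getD_counter,
        List.contains_iff_mem.mpr hc, if_true]
      ring
    · have h0 : p.count c = 0 := List.count_eq_zero.mpr hc
      have : p.contains c = false := by simp [hc]
      simp [PySem.Dict.contains_counter, h0, hc]

lemma pvProd_congr_mul {ks : List Char} (hk : ks.Nodup) {c : Char} (hc : c ∈ ks)
    (f g : Char → Int) (m : Int) (hne : ∀ k ∈ ks, k ≠ c → g k = f k) (heq : g c = f c * m) :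
    (ks.map g).prod = (ks.map f).prod * m := by
  induction ks with
  | nil => cases hc
  | cons k ks ih =>
    rcases List.nodup_cons.mp hk with ⟨hkn, hnd⟩
    rcases List.mem_cons.mp hc with rfl | hc'
    · have hmap : ks.map g = ks.map f := by
        apply List.map_congr_left
        intro x hx
        exact hne x (List.mem_cons_of_mem _ hx) (fun h => hkn (h ▸ hx))
      simp only [List.map_cons, List.prod_cons, heq, hmap]
      ring
    · have hgk : g k = f k := hne k List.mem_cons_self (fun h => hkn (h ▸ hc'))
      have := ih hnd hc' (fun x hx hxne => hne x (List.mem_cons_of_mem _ hx) hxne)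
      simp only [List.map_cons, List.prod_cons, hgk, this]
      ring

lemma pvProd_snoc (p : List Char) (c : Char) :
    pvProd (p ++ [c]) = pvProd p * ((p.count c : Int) + 1) := by
  unfold pvProd
  by_cases hc : c ∈ p
  · rw [PySem.Set.ofList_append_singleton,
      PySem.Set.add_of_mem ((PySem.Set.mem_ofList p c).mpr hc)]
    refine pvProd_congr_mul (PySem.Set.nodup_ofList p) ((PySem.Set.mem_ofList p c).mpr hc) _ _
      (((p.count c : Int)) + 1) ?_ ?_
    · intro k _ hkc
      have : (p ++ [c]).count k = p.count k := by
        simp [List.count_append, Ne.symm hkc]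
      rw [this]
    · have : (p ++ [c]).count c = p.count c + 1 := by
        simp [List.count_append]
      rw [this]
      push_cast
      exact pvFact_succ _
  · rw [PySem.Set.ofList_append_singleton,
      PySem.Set.add_of_not_mem (fun h => hc ((PySem.Set.mem_ofList p c).mp h))]
    have h0 : p.count c = 0 := List.count_eq_zero.mpr hc
    have hmap : (PySem.Set.ofList p).map (fun k => pvFact (((p ++ [c]).count k : Int)))
        = (PySem.Set.ofList p).map (fun k => pvFact ((p.count k : Int))) := by
      apply List.map_congr_left
      intro k hk
      have hkc : k ≠ c := fun h => hc (h ▸ ((PySem.Set.mem_ofList p k).mp hk))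
      have : (p ++ [c]).count k = p.count k := by
        simp [List.count_append, Ne.symm hkc]
      rw [this]
    rw [List.map_append, List.prod_append, hmap]
    have hf1 : pvFact (1 : Int) = 1 := by decide
    simp [h0, hf1]

lemma pvProd_append (l p : List Char) : pvProd (p ++ l) = pvProd p * pvProdStep p l := by
  induction l generalizing p with
  | nil => simp [pvProdStep]
  | cons c l ih =>
    have : p ++ c :: l = (p ++ [c]) ++ l := by simp
    rw [this, ih, pvProd_snoc, pvProdStep]
    ring

-- ===== VERDICT (by name: the statement is the Claim_ definition above) =====
theorem calc_hand_score_spec : Claim_equal_calc_hand_score := by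
  intro hand _
  show calc_hand_score hand = calc_hand_score_alt hand
  have hA : calc_hand_score hand = 1 * pvProdStep [] hand.toList := by
    unfold calc_hand_score
    have : (PySem.Dict.empty : PySem.Dict Char Int) = PySem.Dict.counter [] := rfl
    rw [this, pvA_loop]
  rw [hA, pvB_eq]
  have h1 : pvProd [] = 1 := rfl
  simpa [h1] using (pvProd_append hand.toList []).symm
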